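-- pv_equiv track=rewrite | github.com/freekdh/advent-of-code-2020 | advent_of_code_2020/day18/solve.py | _get_bracket_levels
-- ===== SOURCE A (Python) =====
-- from collections import defaultdict
--
-- def _get_bracket_levels(equation):
--     current_opening_brackets = []
--     bracket_levels = defaultdict(list)
--     for index, character in enumerate(list(equation)):
--         if character == "(":
--             current_opening_brackets.append(index)
--         elif character == ")":
--             level = len(current_opening_brackets)
--             start_index = current_opening_brackets.pop()
--             end_index = index
--             bracket_levels[level].append((start_index, end_index))
--     return bracket_levels
-- ===== SOURCE B (Python) =====
-- from collections import defaultdict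
--
-- def _get_bracket_levels(equation):
--     chars = list(equation)
--     bracket_levels = defaultdict(list)
--     for j, character in enumerate(chars):
--         if character == ")":
--             level = chars[:j].count("(") - chars[:j].count(")")
--             balance = 1
--             i = j - 1
--             while balance and i >= 0:
--                 if chars[i] == ")":
--                     balance += 1
--                 elif chars[i] == "(":
--                     balance -= 1
--                 i -= 1
--             bracket_levels[level].append((i + 1, j))
--     return bracket_levels
-- ===== Notes on version B (the rewrite author's own statement) =====
-- stated objective: alternative
-- what changed: Replaces the single-pass explicit stack by a stackless matcher: the nesting level of each closing bracket is computed from prefix bracket counts, and its opening partner is found by a backward balance scan.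
import Mathlib
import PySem

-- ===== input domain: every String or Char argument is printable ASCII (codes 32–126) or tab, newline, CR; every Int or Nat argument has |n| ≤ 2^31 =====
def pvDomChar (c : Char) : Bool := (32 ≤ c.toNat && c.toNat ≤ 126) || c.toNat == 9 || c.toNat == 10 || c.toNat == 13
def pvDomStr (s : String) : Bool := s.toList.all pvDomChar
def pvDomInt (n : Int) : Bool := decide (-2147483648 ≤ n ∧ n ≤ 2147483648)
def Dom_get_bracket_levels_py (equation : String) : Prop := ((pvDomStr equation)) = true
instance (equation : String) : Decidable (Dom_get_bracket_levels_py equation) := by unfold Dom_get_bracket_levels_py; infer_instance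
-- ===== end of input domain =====

-- B groups bracket pairs by nesting level without a stack: levels come from prefix counts, matches from a backward balance scan; alternative decomposition, not faster.

-- ===== PORT A =====
-- one loop step of A: push the index of an opening bracket; on a closing bracket pop and record (start, end) under the stack depth
def pvAStep (st : List Int × PySem.Dict Int (List (Int × Int))) (p : Int × Char) :
    List Int × PySem.Dict Int (List (Int × Int)) :=
  if p.2 = '(' then (p.1 :: st.1, st.2)
  else if p.2 = ')' then
    match st.1 with
    | [] => st  -- Python raises IndexError here (pop from an empty list); excluded by Pre_
    | s :: rest =>
      (rest, st.2.modify ((s :: rest).length : Int) [] (fun l => l ++ [(s, p.1)]))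
  else st

def get_bracket_levels_py (equation : String) : List (Int × List (Int × Int)) :=
  ((PySem.List.enumerate equation.toList 0).foldl pvAStep ([], PySem.Dict.empty)).2.items

-- ===== PORT B =====
-- backward balance scan from index i with balance b; returns the index of the matching opening bracket
-- (none = the scan ran off the left end without a match; B's loop then ends with i = -1 and start = i + 1 = 0, which is the .getD 0 below)
def pvScanB (cs : List Char) : Nat → Nat → Option Nat
  | 0, b => if cs.getD 0 ' ' = ')' then none
            else if cs.getD 0 ' ' = '(' then (if b = 1 then some 0 else none)
            else none
  | (i+1), b =>
    if cs.getD (i+1) ' ' = ')' then pvScanB cs i (b+1)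
    else if cs.getD (i+1) ' ' = '(' then (if b = 1 then some (i+1) else pvScanB cs i (b-1))
    else pvScanB cs i b

-- one loop step of B: on a closing bracket at j, level = prefix-count difference, start = backward scan
def pvBStep (cs : List Char) (d : PySem.Dict Int (List (Int × Int))) (p : Int × Char) :
    PySem.Dict Int (List (Int × Int)) :=
  if p.2 = ')' then
    let j := p.1.toNat
    let level : Int := ((cs.take j).count '(' : Int) - ((cs.take j).count ')' : Int)
    let start : Nat := (pvScanB cs (j - 1) 1).getD 0
    d.modify level [] (fun l => l ++ [((start : Int), p.1)])
  else d

def get_bracket_levels_py_alt (equation : String) : List (Int × List (Int × Int)) :=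
  ((PySem.List.enumerate equation.toList 0).foldl (pvBStep equation.toList) PySem.Dict.empty).items

-- ===== PRECONDITION & SPEC =====
-- Pre_ excludes exactly the strings having a prefix with more closing than opening parentheses: there A pops an empty stack and raises IndexError.
def Pre_get_bracket_levels_py (equation : String) : Prop :=
  ∀ k ∈ List.range (equation.toList.length + 1),
    (equation.toList.take k).count ')' ≤ (equation.toList.take k).count '('
instance (equation : String) : Decidable (Pre_get_bracket_levels_py equation) := by
  unfold Pre_get_bracket_levels_py; infer_instance

def pvWitness_get_bracket_levels_py : String := "(1+(2*3))"

def Spec_get_bracket_levels_py (equation : String) (out : List (Int × List (Int × Int))) : Prop := out = get_bracket_levels_py_alt equation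
instance (equation : String) (out : List (Int × List (Int × Int))) : Decidable (Spec_get_bracket_levels_py equation out) := by unfold Spec_get_bracket_levels_py; infer_instance

-- ===== CLAIM (what is proved, stated in full; the proofs are below) =====
def Claim_equal_get_bracket_levels_py : Prop := ∀ (equation : String), Dom_get_bracket_levels_py equation → Pre_get_bracket_levels_py equation → Spec_get_bracket_levels_py equation (get_bracket_levels_py equation)

-- ===== LEMMAS AND PROOFS =====

-- model of A's stack after reading the first k characters (head = most recent open index)
def pvStk (cs : List Char) : Nat → List Nat
  | 0 => []
  | (k+1) =>
    if cs.getD k ' ' = '(' then k :: pvStk cs k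
    else if cs.getD k ' ' = ')' then (pvStk cs k).tail
    else pvStk cs k

theorem pvStk_length (cs : List Char) (k : Nat) (hk : k ≤ cs.length)
    (hpre : ∀ m ≤ k, (cs.take m).count ')' ≤ (cs.take m).count '(') :
    (pvStk cs k).length + (cs.take k).count ')' = (cs.take k).count '(' := by
  induction k with
  | zero => simp [pvStk]
  | succ k ih =>
    have hk' : k < cs.length := by omega
    have ihh := ih (by omega) (fun m hm => hpre m (by omega))
    have htake : cs.take (k+1) = cs.take k ++ [cs[k]] := by
      rw [List.take_add_one]; simp [List.getElem?_eq_getElem hk']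
    have hgetD : cs.getD k ' ' = cs[k] := by simp [List.getD, List.getElem?_eq_getElem hk']
    have hprek1 := hpre (k+1) le_rfl
    rw [htake] at hprek1 ⊢
    simp only [List.count_append, List.count_singleton] at hprek1 ⊢
    unfold pvStk
    rw [hgetD]
    by_cases h1 : cs[k] = '('
    · simp [h1]; omega
    · by_cases h2 : cs[k] = ')'
      · simp [h2] at hprek1 ⊢
        omega
      · simp [h1, h2] at hprek1 ⊢
        omega


theorem pvScanB_spec (cs : List Char) :
    ∀ i, i < cs.length → ∀ b, 1 ≤ b → ∀ (h : b - 1 < (pvStk cs (i+1)).length),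
      pvScanB cs i b = some ((pvStk cs (i+1))[b-1]) := by
  intro i
  induction i with
  | zero =>
    intro _ b hb h
    by_cases h1 : cs[0]?.getD ' ' = '('
    · have hst : pvStk cs 1 = [0] := by simp [pvStk, List.getD, h1]
      have hb1 : b = 1 := by rw [hst] at h; simp at h; omega
      subst hb1
      have h1' : cs[0]?.getD ' ' ≠ ')' := by rw [h1]; decide
      simp only [hst]
      simp [pvScanB, List.getD, h1, h1']
    · exfalso
      have hst : pvStk cs 1 = [] := by
        by_cases h2 : cs[0]?.getD ' ' = ')' <;> simp [pvStk, List.getD, h1, h2]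
      rw [hst] at h; simp at h
  | succ i ih =>
    intro hlen b hb h
    have hilen : i < cs.length := by omega
    by_cases h2 : cs[i+1]?.getD ' ' = ')'
    · have hne : cs[i+1]?.getD ' ' ≠ '(' := by rw [h2]; decide
      have hst : pvStk cs (i+1+1) = (pvStk cs (i+1)).tail := by
        conv_lhs => rw [pvStk]
        simp [List.getD, h2, hne]
      rw [hst] at h
      have hgoal : pvScanB cs (i+1) b = pvScanB cs i (b+1) := by
        conv_lhs => rw [pvScanB]
        simp [List.getD, h2, hne]
      rw [hgoal]
      simp only [hst]
      have hlt : (b+1) - 1 < (pvStk cs (i+1)).length := by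
        rw [List.length_tail] at h; omega
      rw [ih hilen (b+1) (by omega) hlt]
      congr 1
      rw [List.getElem_tail]
      congr 1
      omega
    · by_cases h1 : cs[i+1]?.getD ' ' = '('
      · have hst : pvStk cs (i+1+1) = (i+1) :: pvStk cs (i+1) := by
          conv_lhs => rw [pvStk]
          simp [List.getD, h1]
        rw [hst] at h
        simp only [hst]
        by_cases hb1 : b = 1
        · subst hb1
          conv_lhs => rw [pvScanB]
          simp [List.getD, h1, h2]
        · have hgoal : pvScanB cs (i+1) b = pvScanB cs i (b-1) := by
            conv_lhs => rw [pvScanB]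
            simp [List.getD, h1, h2, hb1]
          rw [hgoal]
          have hlt : (b-1) - 1 < (pvStk cs (i+1)).length := by
            simp at h; omega
          rw [ih hilen (b-1) (by omega) hlt]
          congr 1
          rw [List.getElem_cons, dif_neg (by omega)]
      · have hst : pvStk cs (i+1+1) = pvStk cs (i+1) := by
          conv_lhs => rw [pvStk]
          simp [List.getD, h1, h2]
        rw [hst] at h
        simp only [hst]
        have hgoal : pvScanB cs (i+1) b = pvScanB cs i b := by
          conv_lhs => rw [pvScanB]
          simp [List.getD, h1, h2]
        rw [hgoal]
        exact ih hilen b hb h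


theorem pvMain (cs : List Char)
    (hpre : ∀ m ≤ cs.length, (cs.take m).count ')' ≤ (cs.take m).count '(') :
    ∀ k, k ≤ cs.length →
      (PySem.List.enumerate (cs.take k) 0).foldl pvAStep ([], PySem.Dict.empty)
      = ((pvStk cs k).map (fun n => (n : Int)),
         (PySem.List.enumerate (cs.take k) 0).foldl (pvBStep cs) PySem.Dict.empty) := by
  intro k
  induction k with
  | zero => simp [pvStk, PySem.List.enumerate]
  | succ k ih =>
    intro hk1
    have hk : k < cs.length := by omega
    have ihh := ih (by omega)
    have htake : cs.take (k+1) = cs.take k ++ [cs[k]] := by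
      rw [List.take_add_one]; simp [List.getElem?_eq_getElem hk]
    have hlen : (cs.take k).length = k := by simp; omega
    rw [htake, PySem.List.enumerate_append, hlen,
        PySem.List.enumerate_cons, PySem.List.enumerate_nil]
    rw [List.foldl_append, List.foldl_append, ihh]
    simp only [List.foldl_cons, List.foldl_nil, zero_add]
    -- length invariant at k
    have hL := pvStk_length cs k (by omega) (fun m hm => hpre m (by omega))
    have hLk1 := hpre (k+1) (by omega)
    rw [htake] at hLk1
    simp only [List.count_append, List.count_singleton] at hLk1
    by_cases h1 : cs[k] = '('
    · have hst : pvStk cs (k+1) = k :: pvStk cs k := by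
        conv_lhs => rw [pvStk]
        simp [List.getD, List.getElem?_eq_getElem hk, h1]
      simp [pvAStep, pvBStep, h1, hst]
    · by_cases h2 : cs[k] = ')'
      · -- stack is nonempty
        have hne : pvStk cs k ≠ [] := by
          intro hnil
          rw [hnil] at hL
          simp [h1, h2] at hLk1
          simp at hL
          omega
        obtain ⟨s, rest, hsr⟩ : ∃ s rest, pvStk cs k = s :: rest := by
          cases hstk : pvStk cs k with
          | nil => exact absurd hstk hne
          | cons a t => exact ⟨a, t, rfl⟩
        have hst : pvStk cs (k+1) = rest := by
          conv_lhs => rw [pvStk]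
          simp [List.getD, List.getElem?_eq_getElem hk, h1, h2, hsr]
        have hkpos : 1 ≤ k := by
          by_contra hk0
          have : k = 0 := by omega
          subst this
          rw [show pvStk cs 0 = [] from rfl] at hsr
          exact absurd hsr (by simp)
        obtain ⟨m, rfl⟩ : ∃ m, k = m + 1 := ⟨k - 1, by omega⟩
        have hscan : pvScanB cs m 1 = some s := by
          have hsp := pvScanB_spec cs m (by omega) 1 le_rfl (by rw [hsr]; simp)
          rw [hsp]
          simp [hsr]
        have hlev : ((cs.take (m+1)).count '(' : Int) - ((cs.take (m+1)).count ')' : Int)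
            = ((s :: rest).length : Int) := by
          rw [hsr] at hL
          simp at hL ⊢
          omega
        clear ihh ih
        simp only [pvAStep, pvBStep, List.map_cons, hsr, hst]
        norm_num [h2, hscan, hlev]
        exact fun hc => absurd hc (by decide)
      · have hst : pvStk cs (k+1) = pvStk cs k := by
          conv_lhs => rw [pvStk]
          simp [List.getD, List.getElem?_eq_getElem hk, h1, h2]
        simp [pvAStep, pvBStep, h1, h2, hst]

-- ===== VERDICT (by name: the statement is the Claim_ definition above) =====
theorem get_bracket_levels_py_spec : Claim_equal_get_bracket_levels_py := by
  intro eq _ hpre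
  unfold Spec_get_bracket_levels_py get_bracket_levels_py get_bracket_levels_py_alt
  have hpre' : ∀ m ≤ eq.toList.length, (eq.toList.take m).count ')' ≤ (eq.toList.take m).count '(' := by
    intro m hm
    exact hpre m (List.mem_range.mpr (by omega))
  have h := pvMain eq.toList hpre' eq.toList.length le_rfl
  rw [List.take_length] at h
  rw [h]
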